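-- pv_equiv track=rewrite | github.com/kkarolis/cuddly-guacamole | server/main.py | _check_group_key_order
-- ===== SOURCE A (Python) =====
-- from typing import List, Optional, Any
-- from enum import Enum
-- import collections
-- import functools
--
-- class GroupByField(str, Enum):
--     # below must be ordered by "cardinality"
--     # lowest "cardinality" items first.
--     DIRECTION = "direction"
--     MUID = "muid"
--     YEAR = "year"
--     MONTH = "month"
--     DAY = "day"
--     DAY_OF_WEEK = "day_of_week"
--     HOUR = "hour"
--
-- GROUP_BY_FIELDS_CARDINALITY_ORDERED = collections.OrderedDict(
--     [(v, i) for i, v in enumerate(GroupByField)]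
-- )
--
-- def _check_group_key_order(group_key: List[GroupByField]) -> bool:
--     group_key_cardinality_index_values = [
--         GROUP_BY_FIELDS_CARDINALITY_ORDERED[k] for k in group_key
--     ]
--     # check each element with previous one making sure it's increasing
--     is_correct_order, _ = functools.reduce(
--         (lambda x, y: (x[0] and y > x[1], y)),
--         group_key_cardinality_index_values,
--         (True, -1),
--     )
--     return is_correct_order
-- ===== SOURCE B (Python) =====
-- from typing import List
-- from enum import Enum
-- import collections
--
-- class GroupByField(str, Enum):
--     DIRECTION = "direction"
--     MUID = "muid"
--     YEAR = "year"
--     MONTH = "month"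
--     DAY = "day"
--     DAY_OF_WEEK = "day_of_week"
--     HOUR = "hour"
--
-- GROUP_BY_FIELDS_CARDINALITY_ORDERED = collections.OrderedDict(
--     [(v, i) for i, v in enumerate(GroupByField)]
-- )
--
-- def _check_group_key_order(group_key):
--     vals = [GROUP_BY_FIELDS_CARDINALITY_ORDERED[k] for k in group_key]
--     # strictly increasing  <=>  equal to the sorted list of its distinct values
--     return vals == sorted(set(vals))
-- ===== Notes on version B (the rewrite author's own statement) =====
-- stated objective: alternative
-- what changed: Replaces the functools.reduce fold threading a (bool, previous-value) accumulator with a sort-based check: the mapped cardinality indices are strictly increasing iff the list equals sorted(set(vals)), so B deduplicates, sorts, and compares whole lists instead of scanning with an accumulator.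
-- outside the precondition, e.g. on _check_group_key_order(['foo']): A raises KeyError, B raises KeyError
import Mathlib
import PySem

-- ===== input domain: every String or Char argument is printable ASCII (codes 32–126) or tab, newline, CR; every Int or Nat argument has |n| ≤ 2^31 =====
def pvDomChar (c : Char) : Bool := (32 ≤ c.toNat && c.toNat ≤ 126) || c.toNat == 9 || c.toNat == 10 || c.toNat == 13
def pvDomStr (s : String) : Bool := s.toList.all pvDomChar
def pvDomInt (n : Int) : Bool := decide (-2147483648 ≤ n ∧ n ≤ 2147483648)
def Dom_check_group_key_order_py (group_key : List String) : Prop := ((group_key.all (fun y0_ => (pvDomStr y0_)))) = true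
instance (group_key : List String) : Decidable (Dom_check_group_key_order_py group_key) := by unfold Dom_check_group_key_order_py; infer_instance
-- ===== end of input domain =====

-- B replaces A's reduce-style fold threading a (bool, previous) accumulator by a sort-based
-- check: the index list is strictly increasing iff it equals sorted(set(vals)) (alternative algorithm).


-- ===== PORT A =====
-- GROUP_BY_FIELDS_CARDINALITY_ORDERED: the OrderedDict [(v, i) for i, v in enumerate(GroupByField)]
def pvCard : PySem.Dict String Int :=
  PySem.Dict.ofList [("direction", 0), ("muid", 1), ("year", 2), ("month", 3),
                     ("day", 4), ("day_of_week", 5), ("hour", 6)]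

-- d[k]: KeyError (get? = none) is excluded by Pre_, so the default is never reached there
def pvLookup (k : String) : Int := (PySem.Dict.get? pvCard k).getD 0

def check_group_key_order_py (group_key : List String) : Bool :=
  let vals := group_key.map pvLookup
  (vals.foldl (fun x y => (x.1 && decide (y > x.2), y)) (true, (-1 : Int))).1

-- ===== PORT B =====
def check_group_key_order_py_alt (group_key : List String) : Bool :=
  let vals := group_key.map pvLookup
  -- vals == sorted(set(vals))
  vals == PySem.List.sorted (PySem.Set.ofList vals) (fun x => x) false

-- ===== PRECONDITION & SPEC =====
-- Pre_ excludes exactly the inputs where the dict lookup raises KeyError (in both A and B):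
-- keys that are not one of the seven group-by field names.
def Pre_check_group_key_order_py (group_key : List String) : Prop :=
  ∀ k ∈ group_key, k ∈ ["direction", "muid", "year", "month", "day", "day_of_week", "hour"]
instance (group_key : List String) : Decidable (Pre_check_group_key_order_py group_key) := by
  unfold Pre_check_group_key_order_py; infer_instance

def pvWitness_check_group_key_order_py : List String := ["direction", "year", "hour"]

def Spec_check_group_key_order_py (group_key : List String) (out : Bool) : Prop := out = check_group_key_order_py_alt group_key
instance (group_key : List String) (out : Bool) : Decidable (Spec_check_group_key_order_py group_key out) := by unfold Spec_check_group_key_order_py; infer_instance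

-- ===== CLAIM (what is proved, stated in full; the proofs are below) =====
def Claim_equal_check_group_key_order_py : Prop := ∀ (group_key : List String), Dom_check_group_key_order_py group_key → Pre_check_group_key_order_py group_key → Spec_check_group_key_order_py group_key (check_group_key_order_py group_key)

-- ===== LEMMAS AND PROOFS =====

-- "strictly increasing chain starting above p" — characterisation of A's fold
def pvChain : Int → List Int → Bool
  | _, [] => true
  | p, x :: t => decide (x > p) && pvChain x t

theorem pv_foldl_fst (l : List Int) : ∀ (b : Bool) (p : Int),
    (l.foldl (fun x y => (x.1 && decide (y > x.2), y)) (b, p)).1 = (b && pvChain p l) := by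
  induction l with
  | nil => intro b p; simp [pvChain]
  | cons x t ih =>
      intro b p
      simp only [List.foldl_cons, pvChain, ih, Bool.and_assoc]

theorem pv_chain_lt (l : List Int) : ∀ (p : Int), pvChain p l = true → ∀ y ∈ l, p < y := by
  induction l with
  | nil => intro p _ y hy; simp at hy
  | cons x t ih =>
      intro p h y hy
      simp only [pvChain, Bool.and_eq_true, decide_eq_true_eq] at h
      rcases List.mem_cons.mp hy with rfl | hy
      · exact h.1
      · exact lt_trans h.1 (ih x h.2 y hy)

theorem pv_chain_pairwise (l : List Int) : ∀ (p : Int), pvChain p l = true → l.Pairwise (· < ·) := by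
  induction l with
  | nil => intro p _; exact List.Pairwise.nil
  | cons x t ih =>
      intro p h
      simp only [pvChain, Bool.and_eq_true, decide_eq_true_eq] at h
      exact List.Pairwise.cons (pv_chain_lt t x h.2) (ih x h.2)

theorem pv_pairwise_chain (l : List Int) : ∀ (p : Int), (∀ x ∈ l, p < x) →
    l.Pairwise (· < ·) → pvChain p l = true := by
  induction l with
  | nil => intro p _ _; rfl
  | cons x t ih =>
      intro p hp hpw
      rcases List.pairwise_cons.mp hpw with ⟨hxt, hpw'⟩
      simp only [pvChain, Bool.and_eq_true, decide_eq_true_eq]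
      exact ⟨hp x List.mem_cons_self, ih x hxt hpw'⟩

theorem pv_lookup_nonneg (k : String)
    (hk : k ∈ ["direction", "muid", "year", "month", "day", "day_of_week", "hour"]) :
    0 ≤ pvLookup k := by
  fin_cases hk <;> decide

-- ===== VERDICT (by name: the statement is the Claim_ definition above) =====
theorem check_group_key_order_py_spec : Claim_equal_check_group_key_order_py := by
  intro group_key _hdom hpre
  unfold Spec_check_group_key_order_py check_group_key_order_py check_group_key_order_py_alt
  set l := group_key.map pvLookup with hl
  have hnn : ∀ x ∈ l, (-1 : Int) < x := by
    intro x hx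
    rcases List.mem_map.mp hx with ⟨k, hk, rfl⟩
    have := pv_lookup_nonneg k (hpre k hk)
    omega
  rw [pv_foldl_fst, Bool.true_and]
  rw [Bool.eq_iff_iff]
  simp only [beq_iff_eq]
  constructor
  · intro hc
    have hpw := pv_chain_pairwise l (-1) hc
    have hnd : l.Nodup := hpw.imp (fun h => ne_of_lt h)
    rw [PySem.Set.ofList_eq_self_of_nodup l hnd]
    exact (PySem.List.sorted_eq_of_perm_of_pairwise_lt l l (fun x => x) (List.Perm.refl l) hpw).symm
  · intro he
    have hpw : l.Pairwise (· < ·) := by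
      rw [he]; exact PySem.List.sorted_ofList_pairwise_lt l
    exact pv_pairwise_chain l (-1) hnn hpw
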